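-- pv_equiv track=rewrite | github.com/maliubiao/treehouse | gpt_workflow/translate.py | _split_large_file
-- ===== SOURCE A (Python) =====
-- from typing import Dict, List, Optional, Tuple
--
-- def _split_large_file(content: str, chunk_size: int = 25 * 1024) -> List[Tuple[str, str]]:
--     """Split large file content into chunks of approximately chunk_size bytes while preserving complete lines
--     Returns a list of tuples (numbered_content, original_content, line_range)"""
--     chunks = []
--     current_chunk = []
--     current_numbered_chunk = []
--     current_size = 0
--     line_number = 1
--
--     for line in content.splitlines(keepends=True):
--         line_size = len(line.encode("utf-8"))
--         numbered_line = f"{line_number:4d} | {line}"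
--
--         # If adding this line would exceed chunk size and we already have content,
--         # finalize the current chunk and start a new one
--         if current_size + line_size > chunk_size and current_chunk:
--             chunks.append(
--                 (
--                     "".join(current_numbered_chunk),
--                     "".join(current_chunk),
--                     line_number - 1,
--                 )
--             )
--             current_chunk = [line]
--             current_numbered_chunk = [numbered_line]
--             current_size = line_size
--             line_number += 1
--         else:
--             current_chunk.append(line)
--             current_numbered_chunk.append(numbered_line)
--             current_size += line_size
--             line_number += 1
--
--     # Add the last chunk if it has content
--     if current_chunk:
--         chunks.append(
--             (
--                 "".join(current_numbered_chunk),
--                 "".join(current_chunk),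
--                 line_number - 1,
--             )
--         )
--
--     return chunks
-- ===== SOURCE B (Python) =====
-- def _split_large_file(content, chunk_size=25 * 1024):
--     """Greedy boundary scan over precomputed line byte sizes, then build each
--     chunk from its index range (alternative decomposition; same results)."""
--     lines = content.splitlines(keepends=True)
--     sizes = [len(l.encode("utf-8")) for l in lines]
--     n = len(lines)
--     out = []
--     i = 0
--     while i < n:
--         size = sizes[i]
--         j = i + 1
--         while j < n and size + sizes[j] <= chunk_size:
--             size += sizes[j]
--             j += 1
--         numbered = "".join("%4d | %s" % (k + 1, lines[k]) for k in range(i, j))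
--         out.append((numbered, "".join(lines[i:j]), j))
--         i = j
--     return out
-- ===== Notes on version B (the rewrite author's own statement) =====
-- stated objective: alternative
-- what changed: Replaces A's single pass with running chunk/numbered/size accumulators and a flush guard by a two-phase scheme: precompute per-line byte sizes, find each greedy chunk boundary with an index scan, then build the numbered and original strings per index range.
import Mathlib
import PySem

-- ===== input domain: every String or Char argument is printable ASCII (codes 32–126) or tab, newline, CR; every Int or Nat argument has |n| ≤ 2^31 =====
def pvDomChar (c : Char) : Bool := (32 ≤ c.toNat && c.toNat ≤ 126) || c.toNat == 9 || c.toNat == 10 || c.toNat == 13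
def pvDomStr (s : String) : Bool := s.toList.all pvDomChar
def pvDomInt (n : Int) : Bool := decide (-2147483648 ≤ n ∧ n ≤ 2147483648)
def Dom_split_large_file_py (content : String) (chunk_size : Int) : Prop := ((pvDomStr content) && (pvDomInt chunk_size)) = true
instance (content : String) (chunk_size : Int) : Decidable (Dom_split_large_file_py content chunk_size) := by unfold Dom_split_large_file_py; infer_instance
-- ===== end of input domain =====

-- B replaces A's running chunk/numbered-chunk/size accumulators by a boundary scan over
-- precomputed line sizes plus a per-range build (alternative decomposition, same results).

-- ===== shared primitive helpers (used identically by both ports) =====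

-- content.splitlines(keepends=True): exact on Dom (terminators there are only \n, \r, \r\n)
def pySplitlinesKeepAux (cs : List Char) (cur : List Char) : List (List Char) :=
  match cs with
  | [] => if cur.isEmpty then [] else [cur]
  | '\r' :: '\n' :: t => (cur ++ ['\r', '\n']) :: pySplitlinesKeepAux t []
  | '\n' :: t => (cur ++ ['\n']) :: pySplitlinesKeepAux t []
  | '\r' :: t => (cur ++ ['\r']) :: pySplitlinesKeepAux t []
  | c :: t => pySplitlinesKeepAux t (cur ++ [c])

def pySplitlinesKeep (s : String) : List String :=
  (pySplitlinesKeepAux s.toList []).map String.ofList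

-- len(line.encode("utf-8")): exact on Dom (every admitted char is one UTF-8 byte)
def utf8len (l : String) : Int := (l.toList.length : Int)

-- f"{n:4d}": decimal string right-aligned in width 4 (exact for ':4d')
def pyNum4 (n : Int) : String :=
  let cs := (PySem.Int.toStr n).toList
  String.ofList (List.replicate (4 - cs.length) ' ' ++ cs)

-- "".join(parts)
def strJoin (parts : List String) : String := PySem.Str.join "" parts

-- ===== PORT A =====

-- the body of A's for-loop, on state (chunks, current_chunk, current_numbered_chunk, current_size, line_number)
def stepA (chunk_size : Int)
    (st : List (String × String × Int) × List String × List String × Int × Int)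
    (line : String) : List (String × String × Int) × List String × List String × Int × Int :=
  match st with
  | (chunks, current_chunk, current_numbered_chunk, current_size, line_number) =>
    let line_size := utf8len line
    let numbered_line := pyNum4 line_number ++ " | " ++ line
    if current_size + line_size > chunk_size ∧ current_chunk ≠ [] then
      (chunks ++ [(strJoin current_numbered_chunk, strJoin current_chunk, line_number - 1)],
       [line], [numbered_line], line_size, line_number + 1)
    else
      (chunks, current_chunk ++ [line], current_numbered_chunk ++ [numbered_line],
       current_size + line_size, line_number + 1)

def split_large_file_py (content : String) (chunk_size : Int) : List (String × String × Int) :=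
  match (pySplitlinesKeep content).foldl (stepA chunk_size) ([], [], [], 0, 1) with
  | (chunks, current_chunk, current_numbered_chunk, _, line_number) =>
    if current_chunk ≠ [] then
      chunks ++ [(strJoin current_numbered_chunk, strJoin current_chunk, line_number - 1)]
    else chunks

-- ===== PORT B =====

-- Source B's inner while: extend the chunk that already weighs `size` while the next line still fits
def takeChunk (lines : List String) (size : Int) (chunk_size : Int) : List String × List String :=
  match lines with
  | [] => ([], [])
  | l :: rest =>
    if size + utf8len l ≤ chunk_size then
      let td := takeChunk rest (size + utf8len l) chunk_size
      (l :: td.1, td.2)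
    else ([], l :: rest)

theorem takeChunk_rest_le (lines : List String) (size chunk_size : Int) :
    (takeChunk lines size chunk_size).2.length ≤ lines.length := by
  induction lines generalizing size with
  | nil => simp [takeChunk]
  | cons l rest ih =>
    simp only [takeChunk]
    split
    · exact le_trans (ih _) (Nat.le_succ _)
    · simp

-- "%4d | %s" % (k, line) for the successive lines of a chunk starting at line number k
def numFrom (k : Int) : List String → List String
  | [] => []
  | l :: t => (pyNum4 k ++ " | " ++ l) :: numFrom (k + 1) t

-- Source B's outer while: emit one chunk per greedy boundary range, then continue after it
def altGo (lines : List String) (k : Int) (chunk_size : Int) : List (String × String × Int) :=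
  match lines with
  | [] => []
  | l :: rest =>
    let td := takeChunk rest (utf8len l) chunk_size
    let chunk := l :: td.1
    (strJoin (numFrom k chunk), strJoin chunk, k + chunk.length - 1)
      :: altGo td.2 (k + chunk.length) chunk_size
termination_by lines.length
decreasing_by
  simpa using Nat.lt_succ_of_le (takeChunk_rest_le rest (utf8len l) chunk_size)

def split_large_file_py_alt (content : String) (chunk_size : Int) : List (String × String × Int) :=
  altGo (pySplitlinesKeep content) 1 chunk_size

-- ===== PRECONDITION & SPEC =====
def Spec_split_large_file_py (content : String) (chunk_size : Int) (out : List (String × String × Int)) : Prop := out = split_large_file_py_alt content chunk_size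
instance (content : String) (chunk_size : Int) (out : List (String × String × Int)) : Decidable (Spec_split_large_file_py content chunk_size out) := by unfold Spec_split_large_file_py; infer_instance

-- ===== CLAIM (what is proved, stated in full; the proofs are below) =====
def Claim_equal_split_large_file_py : Prop := ∀ (content : String) (chunk_size : Int), Dom_split_large_file_py content chunk_size → Spec_split_large_file_py content chunk_size (split_large_file_py content chunk_size)

-- ===== LEMMAS AND PROOFS =====

-- total byte size of a list of lines
def bytesOf : List String → Int
  | [] => 0
  | l :: t => utf8len l + bytesOf t

theorem bytesOf_append_singleton (cur : List String) (l : String) :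
    bytesOf (cur ++ [l]) = bytesOf cur + utf8len l := by
  induction cur with
  | nil => simp [bytesOf]
  | cons a t ih => simp [bytesOf, ih]; ring

theorem numFrom_append (s : Int) (xs ys : List String) :
    numFrom s (xs ++ ys) = numFrom s xs ++ numFrom (s + xs.length) ys := by
  induction xs generalizing s with
  | nil => simp [numFrom]
  | cons a t ih =>
    have h : s + 1 + (t.length : Int) = s + ((t.length + 1 : Nat) : Int) := by push_cast; ring
    simp only [List.cons_append, numFrom, ih (s + 1), List.length_cons, h]

-- the continuation of B after a partially built chunk `cur` that started at line number st
def altCont (rest cur : List String) (st chunk_size : Int) : List (String × String × Int) :=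
  let td := takeChunk rest (bytesOf cur) chunk_size
  (strJoin (numFrom st (cur ++ td.1)), strJoin (cur ++ td.1), st + (cur ++ td.1).length - 1)
    :: altGo td.2 (st + (cur ++ td.1).length) chunk_size

theorem altGo_cons (l : String) (rest : List String) (k chunk_size : Int) :
    altGo (l :: rest) k chunk_size = altCont rest [l] k chunk_size := by
  rw [altGo]
  simp [altCont, bytesOf, numFrom]

def finishA (st : List (String × String × Int) × List String × List String × Int × Int) :
    List (String × String × Int) :=
  match st with
  | (chunks, cur, num, _, k) =>
    if cur ≠ [] then chunks ++ [(strJoin num, strJoin cur, k - 1)] else chunks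

-- main invariant: from any state whose current chunk is `cur` (nonempty, started at line st),
-- A's remaining fold followed by the final flush produces B's continuation
theorem go_eq (rest : List String) (cur : List String) (chunks : List (String × String × Int))
    (st chunk_size : Int) (hcur : cur ≠ []) :
    finishA (rest.foldl (stepA chunk_size)
        (chunks, cur, numFrom st cur, bytesOf cur, st + cur.length)) =
      chunks ++ altCont rest cur st chunk_size := by
  induction rest generalizing cur chunks st with
  | nil =>
    simp [finishA, hcur, altCont, takeChunk, altGo]
  | cons l rs ih =>
    simp only [List.foldl_cons]
    by_cases hgt : bytesOf cur + utf8len l > chunk_size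
    · -- flush: A emits the current chunk, starts a new one with l
      have hstep : stepA chunk_size (chunks, cur, numFrom st cur, bytesOf cur, st + cur.length) l
          = (chunks ++ [(strJoin (numFrom st cur), strJoin cur, st + cur.length - 1)],
             [l], [pyNum4 (st + cur.length) ++ " | " ++ l], utf8len l, st + cur.length + 1) := by
        simp [stepA, hgt, hcur]
      rw [hstep]
      have h1 : (utf8len l : Int) = bytesOf [l] := by simp [bytesOf]
      have h2 : [pyNum4 (st + cur.length) ++ " | " ++ l] = numFrom (st + cur.length) [l] := by
        simp [numFrom]
      have h3 : (st + cur.length + 1 : Int) = (st + cur.length) + ([l] : List String).length := by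
        simp
      rw [h1, h2, h3, ih [l] _ (st + cur.length) (by simp)]
      have htk : takeChunk (l :: rs) (bytesOf cur) chunk_size = ([], l :: rs) := by
        simp [takeChunk]; omega
      conv_rhs => rw [altCont, htk]
      simp [altGo_cons, List.append_assoc]
    · -- no flush: A appends l to the current chunk
      have hstep : stepA chunk_size (chunks, cur, numFrom st cur, bytesOf cur, st + cur.length) l
          = (chunks, cur ++ [l], numFrom st cur ++ [pyNum4 (st + cur.length) ++ " | " ++ l],
             bytesOf cur + utf8len l, st + cur.length + 1) := by
        simp [stepA, hgt]
      rw [hstep]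
      have h2 : numFrom st cur ++ [pyNum4 (st + cur.length) ++ " | " ++ l]
          = numFrom st (cur ++ [l]) := by
        rw [numFrom_append]; simp [numFrom]
      have h3 : (st + cur.length + 1 : Int) = st + ((cur ++ [l]).length : Int) := by
        simp; ring
      rw [h2, ← bytesOf_append_singleton, h3, ih (cur ++ [l]) _ st (by simp)]
      have htk : takeChunk (l :: rs) (bytesOf cur) chunk_size
          = (l :: (takeChunk rs (bytesOf cur + utf8len l) chunk_size).1,
             (takeChunk rs (bytesOf cur + utf8len l) chunk_size).2) := by
        rw [takeChunk]; simp; omega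
      simp only [altCont, htk, bytesOf_append_singleton]
      simp [List.append_assoc]

-- ===== VERDICT (by name: the statement is the Claim_ definition above) =====
theorem split_large_file_py_spec : Claim_equal_split_large_file_py := by
  intro content chunk_size _
  unfold Spec_split_large_file_py split_large_file_py split_large_file_py_alt
  cases hls : pySplitlinesKeep content with
  | nil => simp [altGo]
  | cons l rest =>
    have hinit : stepA chunk_size ([], [], [], 0, 1) l
        = ([], [l], numFrom 1 [l], bytesOf [l], 1 + (([l] : List String).length : Int)) := by
      simp [stepA, numFrom, bytesOf]
    have := go_eq rest [l] [] 1 chunk_size (by simp)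
    rw [List.foldl_cons, hinit] at *
    calc finishA (rest.foldl (stepA chunk_size) ([], [l], numFrom 1 [l], bytesOf [l],
            1 + (([l] : List String).length : Int))) = [] ++ altCont rest [l] 1 chunk_size := this
      _ = altGo (l :: rest) 1 chunk_size := by rw [altGo_cons]; simp
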